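-- pv_equiv track=rewrite | github.com/Surxe/Wordle | src/main.py | getWordListScores
-- ===== SOURCE A (Python) =====
-- def getWordListScores(wordList, natOccur, letters): #get nat occur for each letter and sum it to get score
--   wordListScores = []
--   for w in range(len(wordList)): #loop thru each word in list
--     word = wordList[w]
--     wordScore = 0
--     for l in range(len(word)): #loop thru each letter in word
--       letter = word[l:l+1]
--       wordScore = wordScore + natOccur[letters.index(letter.upper())]
--     wordListScores.append(wordScore)
--   return wordListScores
-- ===== SOURCE B (Python) =====
-- def getWordListScores(wordList, natOccur, letters):
--     scores = []
--     for word in wordList: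
--         counts = {}
--         for ch in word:
--             counts[ch] = counts.get(ch, 0) + 1
--         scores.append(sum(n * natOccur[letters.index(c.upper())]
--                           for c, n in counts.items()))
--     return scores
-- ===== Notes on version B (the rewrite author's own statement) =====
-- stated objective: alternative
-- what changed: Per word, B first builds a character frequency table and then sums count * natOccur[letters.index(c.upper())] over the distinct characters, instead of A's per-position slice-and-lookup loop; letters.index is called once per distinct character rather than once per position.
import Mathlib
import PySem

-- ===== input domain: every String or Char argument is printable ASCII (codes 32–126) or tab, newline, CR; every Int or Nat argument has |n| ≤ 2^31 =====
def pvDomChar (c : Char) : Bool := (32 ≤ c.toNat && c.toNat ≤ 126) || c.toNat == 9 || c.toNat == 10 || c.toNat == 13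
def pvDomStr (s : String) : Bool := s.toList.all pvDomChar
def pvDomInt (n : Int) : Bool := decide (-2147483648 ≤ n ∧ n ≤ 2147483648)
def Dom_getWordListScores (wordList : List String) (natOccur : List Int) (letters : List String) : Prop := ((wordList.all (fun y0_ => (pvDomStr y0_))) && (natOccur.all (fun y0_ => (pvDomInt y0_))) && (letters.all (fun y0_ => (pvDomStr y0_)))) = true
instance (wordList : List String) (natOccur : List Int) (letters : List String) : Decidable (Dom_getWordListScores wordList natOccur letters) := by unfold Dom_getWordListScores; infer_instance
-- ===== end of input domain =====

-- B re-implements the per-word score as a frequency-table pass followed by a weighted sum over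
-- distinct characters, instead of A's per-position slice-and-lookup loop; equal return values on Pre_.

-- ===== PORT A =====
-- natOccur[letters.index(letter.upper())]; the `none`/out-of-range branches (Python ValueError /
-- IndexError) are excluded by Pre_ below and default to 0 in the port.
def pvLookupA (natOccur : List Int) (letters : List String) (letter : String) : Int :=
  match PySem.List.index? letters (PySem.Str.upper letter) with
  | some i => PySem.List.pyGetD natOccur (i : Int) 0
  | none => 0

def getWordListScores (wordList : List String) (natOccur : List Int) (letters : List String) : List Int :=
  (PySem.List.pyRange 0 (wordList.length : Int)).foldl
    (fun wordListScores w =>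
      let word := PySem.List.pyGetD wordList w ""
      let wordScore :=
        (PySem.List.pyRange 0 (PySem.Str.len word)).foldl
          (fun wordScore l =>
            let letter := PySem.Str.slice word (some l) (some (l + 1))
            wordScore + pvLookupA natOccur letters letter) 0
      wordListScores ++ [wordScore]) []

-- ===== PORT B =====
def pvLookupB (natOccur : List Int) (letters : List String) (c : Char) : Int :=
  match PySem.List.index? letters (PySem.Str.upper (String.ofList [c])) with
  | some i => PySem.List.pyGetD natOccur (i : Int) 0
  | none => 0

def getWordListScores_alt (wordList : List String) (natOccur : List Int) (letters : List String) : List Int :=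
  wordList.map (fun word =>
    let counts := word.toList.foldl (fun d ch => d.insert ch (d.getD ch 0 + 1))
                    (PySem.Dict.empty : PySem.Dict Char Int)
    counts.items.foldl (fun s p => s + p.2 * pvLookupB natOccur letters p.1) 0)

-- ===== PRECONDITION & SPEC =====
-- Pre_ excludes exactly the inputs where Python A raises: a word character whose uppercased
-- one-character string is not in `letters` (ValueError from .index), or whose letters-index is
-- not below len(natOccur) (IndexError).  (`getD natOccur.length` makes `none` fail the bound.)
def Pre_getWordListScores (wordList : List String) (natOccur : List Int) (letters : List String) : Prop :=
  (wordList.all (fun word => word.toList.all (fun c =>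
    (PySem.List.index? letters (PySem.Str.upper (String.ofList [c]))).getD natOccur.length < natOccur.length))) = true
instance (wordList : List String) (natOccur : List Int) (letters : List String) : Decidable (Pre_getWordListScores wordList natOccur letters) := by unfold Pre_getWordListScores; infer_instance

def pvWitness_getWordListScores : List String × List Int × List String :=
  (["ab", "ba"], [1, 2], ["A", "B"])

def Spec_getWordListScores (wordList : List String) (natOccur : List Int) (letters : List String) (out : List Int) : Prop := out = getWordListScores_alt wordList natOccur letters
instance (wordList : List String) (natOccur : List Int) (letters : List String) (out : List Int) : Decidable (Spec_getWordListScores wordList natOccur letters out) := by unfold Spec_getWordListScores; infer_instance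

-- ===== CLAIM (what is proved, stated in full; the proofs are below) =====
def Claim_equal_getWordListScores : Prop := ∀ (wordList : List String) (natOccur : List Int) (letters : List String), Dom_getWordListScores wordList natOccur letters → Pre_getWordListScores wordList natOccur letters → Spec_getWordListScores wordList natOccur letters (getWordListScores wordList natOccur letters)

-- ===== LEMMAS AND PROOFS =====

theorem pvWitness_ok :
    Dom_getWordListScores pvWitness_getWordListScores.1 pvWitness_getWordListScores.2.1 pvWitness_getWordListScores.2.2 ∧
    Pre_getWordListScores pvWitness_getWordListScores.1 pvWitness_getWordListScores.2.1 pvWitness_getWordListScores.2.2 := by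
  decide

-- word[l:l+1] for 0 ≤ l < len(word) is the one-character string at position l
theorem pv_slice_one (word : String) (l : Nat) (h : l < word.toList.length) :
    PySem.Str.slice word (some (l : Int)) (some ((l : Int) + 1)) = String.ofList [word.toList[l]] := by
  apply String.toList_inj.mp
  rw [PySem.Str.toList_slice, PySem.Chars.slice_eq_listSlice,
    PySem.List.slice_toNat _ (by omega) (by omega), String.toList_ofList]
  have : ((l : Int) + 1).toNat - (l : Int).toNat = 1 := by omega
  rw [this, Int.toNat_natCast, List.drop_eq_getElem_cons h]
  rfl

-- A's lookup on a one-character string is B's character lookup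
theorem pv_lookupAB (natOccur : List Int) (letters : List String) (c : Char) :
    pvLookupA natOccur letters (String.ofList [c]) = pvLookupB natOccur letters c := rfl

-- A's inner loop is the fold of pvLookupB over the word's characters
theorem pv_scoreA (natOccur : List Int) (letters : List String) (word : String) :
    (PySem.List.pyRange 0 (PySem.Str.len word)).foldl
      (fun wordScore l =>
        wordScore + pvLookupA natOccur letters (PySem.Str.slice word (some l) (some (l + 1)))) 0 =
    ((word.toList.map (pvLookupB natOccur letters)).sum) := by
  rw [PySem.Str.len_eq]
  have main : ∀ (n : Nat), n ≤ word.toList.length → ∀ (init : Int),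
      (PySem.List.pyRange 0 (n : Int)).foldl
        (fun wordScore l =>
          wordScore + pvLookupA natOccur letters (PySem.Str.slice word (some l) (some (l + 1)))) init =
      init + (((word.toList.take n).map (pvLookupB natOccur letters)).sum) := by
    intro n
    induction n with
    | zero => intro _ init; simp [PySem.List.pyRange]
    | succ m ih =>
      intro hm init
      have hmlt : m < word.toList.length := by omega
      have hcast : ((m : Int) + 1) = ((m + 1 : Nat) : Int) := by omega
      rw [← hcast, PySem.List.pyRange_one_succ_right (by omega), List.foldl_append,
        ih (by omega) init]
      simp only [List.foldl_cons, List.foldl_nil]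
      rw [pv_slice_one word m hmlt]
      have htake : word.toList.take (m + 1) = word.toList.take m ++ [word.toList[m]] := by
        rw [List.take_add_one, List.getElem?_eq_getElem hmlt]; rfl
      rw [htake, List.map_append, List.sum_append, pv_lookupAB]
      simp [add_assoc]
  have h := main word.toList.length (le_refl _) 0
  rw [List.take_length] at h
  simpa using h

-- B's per-word score: the counter's weighted sum over distinct characters equals the plain sum
theorem pv_scoreB (natOccur : List Int) (letters : List String) (word : String) :
    ((word.toList.foldl (fun d ch => d.insert ch (d.getD ch 0 + 1))
        (PySem.Dict.empty : PySem.Dict Char Int)).items).foldl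
      (fun s p => s + p.2 * pvLookupB natOccur letters p.1) 0 =
    ((word.toList.map (pvLookupB natOccur letters)).sum) := by
  set cs := word.toList with hcs
  set v := pvLookupB natOccur letters with hv
  rw [PySem.Dict.foldl_insert_getD_add_one_eq_counter, PySem.List.foldl_add,
    PySem.Dict.items_counter]
  have hfin : (PySem.Set.ofList cs).toFinset = cs.toFinset := by
    apply Finset.ext
    intro a
    simp [PySem.Set.mem_ofList]
  calc 0 + (((PySem.Set.ofList cs).map (fun k => (k, (cs.count k : Int)))).map
            (fun p => p.2 * v p.1)).sum
      = ((PySem.Set.ofList cs).map (fun k => (cs.count k : Int) * v k)).sum := by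
        rw [zero_add, List.map_map]; rfl
    _ = ∑ k ∈ (PySem.Set.ofList cs).toFinset, (cs.count k : Int) * v k := by
        rw [List.sum_toFinset _ (PySem.Set.nodup_ofList cs)]
    _ = ∑ k ∈ cs.toFinset, (cs.count k) • v k := by
        rw [hfin]
        apply Finset.sum_congr rfl
        intro k _
        simp
    _ = (cs.map v).sum := (Finset.sum_list_map_count cs v).symm

-- ===== VERDICT (by name: the statement is the Claim_ definition above) =====
theorem getWordListScores_spec : Claim_equal_getWordListScores := by
  intro wordList natOccur letters _ _
  unfold Spec_getWordListScores getWordListScores getWordListScores_alt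
  rw [PySem.List.foldl_pyRange_zero_pyGetD' wordList ""
    (fun wordListScores word =>
      wordListScores ++ [(PySem.List.pyRange 0 (PySem.Str.len word)).foldl
        (fun wordScore l =>
          wordScore + pvLookupA natOccur letters (PySem.Str.slice word (some l) (some (l + 1)))) 0]) [],
    PySem.List.foldl_append_singleton_eq_map]
  simp only [List.nil_append]
  apply List.map_congr_left
  intro word _
  rw [pv_scoreA, pv_scoreB]
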